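-- pv_equiv track=rewrite | github.com/MrBrantCode/unitest_baseline | mut_generate/mist_train_cf/cf_71207/solution.py | merge_and_sort_lists
-- ===== SOURCE A (Python) =====
-- def merge_and_sort_lists(input_list):
--
--     # Check if input is a list
--     if not isinstance(input_list, list):
--         return "Error: The input is not a list."
--
--     for sublist in input_list:
--         # Check if each element of the input is a list
--         if not isinstance(sublist, list):
--             return "Error: The input is not a list of lists."
--         for item in sublist:
--             # Check if each element of the sublist is a string
--             if not isinstance(item, str):
--                 return "Error: The sublist contains non-string elements."
--
--     try:
--         # Remove duplicates in each sublist and sort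
--         input_list = [sorted(list(set(sublist))) for sublist in input_list]
--
--         # Merge sorted sublists and remove duplicates
--         merged_list = sorted(set().union(*input_list))
--
--         return merged_list
--
--     except Exception as e:
--         return f"An error occurred: {str(e)}"
-- ===== SOURCE B (Python) =====
-- def merge_and_sort_lists(input_list):
--     # Same validation as the original.
--     if not isinstance(input_list, list):
--         return "Error: The input is not a list."
--     for sublist in input_list:
--         if not isinstance(sublist, list):
--             return "Error: The input is not a list of lists."
--         for item in sublist:
--             if not isinstance(item, str):
--                 return "Error: The sublist contains non-string elements."
--     # Dedup-and-sort each sublist, merge the sorted runs with balanced rounds of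
--     # two-way merges, then drop consecutive duplicates in one linear pass.
--     runs = [sorted(set(sublist)) for sublist in input_list]
--     while len(runs) > 1:
--         runs = _merge_pairs(runs)
--     merged = runs[0] if runs else []
--     out = []
--     for x in merged:
--         if not out or out[-1] != x:
--             out.append(x)
--     return out
--
--
-- def _merge_pairs(runs):
--     nxt = []
--     for i in range(0, len(runs) - 1, 2):
--         nxt.append(_merge_two(runs[i], runs[i + 1]))
--     if len(runs) % 2:
--         nxt.append(runs[-1])
--     return nxt
--
--
-- def _merge_two(xs, ys):
--     res = []
--     i = j = 0
--     nx, ny = len(xs), len(ys)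
--     while i < nx and j < ny:
--         if xs[i] <= ys[j]:
--             res.append(xs[i]); i += 1
--         else:
--             res.append(ys[j]); j += 1
--     res.extend(xs[i:])
--     res.extend(ys[j:])
--     return res
-- ===== Notes on version B (the rewrite author's own statement) =====
-- stated objective: alternative
-- what changed: Replaces A's global set-union-and-resort with a k-way merge: each sublist is dedup-sorted as in A, the sorted runs are then combined by balanced rounds of two-pointer two-way merges, and one linear pass drops consecutive duplicates; no global set is built and nothing is re-sorted.
import Mathlib
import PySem

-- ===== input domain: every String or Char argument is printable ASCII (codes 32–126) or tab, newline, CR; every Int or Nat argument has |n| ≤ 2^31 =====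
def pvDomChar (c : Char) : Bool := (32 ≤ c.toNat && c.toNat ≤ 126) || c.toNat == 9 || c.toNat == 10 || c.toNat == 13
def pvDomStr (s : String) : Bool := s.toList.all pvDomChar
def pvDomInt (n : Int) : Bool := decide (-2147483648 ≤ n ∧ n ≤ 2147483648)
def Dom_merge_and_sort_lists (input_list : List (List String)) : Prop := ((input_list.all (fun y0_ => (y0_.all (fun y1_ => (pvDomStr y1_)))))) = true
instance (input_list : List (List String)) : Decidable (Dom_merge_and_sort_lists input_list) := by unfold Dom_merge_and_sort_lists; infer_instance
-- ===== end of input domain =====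

-- B replaces A's global set-union-then-resort by a k-way merge of the per-sublist
-- sorted runs followed by a single consecutive-dedup pass (objective: alternative).
-- Under the type convention the argument is always a list of lists of strings, so
-- A's isinstance validation branches and the try/except never fire; the ports carry
-- only the reachable core.

-- ===== PORT A =====
-- input_list = [sorted(list(set(sublist))) for sublist in input_list]
-- merged_list = sorted(set().union(*input_list))
def merge_and_sort_lists (input_list : List (List String)) : List String :=
  PySem.List.sorted
    ((input_list.map (fun sublist =>
        PySem.List.sorted (PySem.Set.ofList sublist) (fun x => x) false)).foldl
      (fun s r => PySem.Set.union s r) PySem.Set.empty)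
    (fun x => x) false

-- ===== PORT B =====
-- _merge_two: standard two-pointer merge of two ascending lists (keeps duplicates)
def mergeTwo : List String → List String → List String
  | [], ys => ys
  | x :: xs, [] => x :: xs
  | x :: xs, y :: ys =>
      if x ≤ y then x :: mergeTwo xs (y :: ys) else y :: mergeTwo (x :: xs) ys
termination_by xs ys => xs.length + ys.length

-- _merge_pairs: one round merging adjacent runs (odd last run carried over)
def mergePairs : List (List String) → List (List String)
  | [] => []
  | [r] => [r]
  | r1 :: r2 :: rest => mergeTwo r1 r2 :: mergePairs rest

theorem length_mergePairs_lt (r1 r2 : List String) (rest : List (List String)) :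
    (mergePairs (r1 :: r2 :: rest)).length < (r1 :: r2 :: rest).length := by
  suffices h : ∀ l : List (List String), (mergePairs l).length ≤ l.length by
    have := h rest; simp [mergePairs]; omega
  intro l
  induction l using mergePairs.induct with
  | case1 => simp [mergePairs]
  | case2 r => simp [mergePairs]
  | case3 r1 r2 rest ih => simp [mergePairs]; omega

-- 'while len(runs) > 1: runs = _merge_pairs(runs)' then 'runs[0] if runs else []'
def mergeAll : List (List String) → List String
  | [] => []
  | [r] => r
  | r1 :: r2 :: rest => mergeAll (mergePairs (r1 :: r2 :: rest))
termination_by l => l.length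
decreasing_by exact length_mergePairs_lt r1 r2 rest

-- runs = [sorted(set(sublist)) …]; balanced merge; then one pass dropping an
-- item equal to the last one appended ('if not out or out[-1] != x').
def merge_and_sort_lists_alt (input_list : List (List String)) : List String :=
  (mergeAll (input_list.map (fun sublist =>
      PySem.List.sorted (PySem.Set.ofList sublist) (fun x => x) false))).foldl
    (fun out x => if out.getLast? ≠ some x then out ++ [x] else out) []

-- ===== PRECONDITION & SPEC =====
def Spec_merge_and_sort_lists (input_list : List (List String)) (out : List String) : Prop := out = merge_and_sort_lists_alt input_list
instance (input_list : List (List String)) (out : List String) : Decidable (Spec_merge_and_sort_lists input_list out) := by unfold Spec_merge_and_sort_lists; infer_instance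

-- ===== CLAIM (what is proved, stated in full; the proofs are below) =====
def Claim_equal_merge_and_sort_lists : Prop := ∀ (input_list : List (List String)), Dom_merge_and_sort_lists input_list → Spec_merge_and_sort_lists input_list (merge_and_sort_lists input_list)

-- ===== LEMMAS AND PROOFS =====

-- membership in a two-way merge
theorem mem_mergeTwo (xs ys : List String) (a : String) :
    a ∈ mergeTwo xs ys ↔ a ∈ xs ∨ a ∈ ys := by
  fun_induction mergeTwo xs ys with
  | case1 ys => simp
  | case2 x xs => simp
  | case3 x xs y ys h ih => simp [ih]; tauto
  | case4 x xs y ys h ih => simp [ih]; tauto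

-- a merge of two ascending lists is ascending
theorem pairwise_mergeTwo (xs ys : List String)
    (hx : xs.Pairwise (· ≤ ·)) (hy : ys.Pairwise (· ≤ ·)) :
    (mergeTwo xs ys).Pairwise (· ≤ ·) := by
  fun_induction mergeTwo xs ys with
  | case1 ys => exact hy
  | case2 x xs => exact hx
  | case3 x xs y ys h ih =>
      rcases List.pairwise_cons.mp hx with ⟨hxall, hx'⟩
      refine List.pairwise_cons.mpr ⟨?_, ih hx' hy⟩
      intro b hb
      rcases (mem_mergeTwo _ _ b).mp hb with hb | hb
      · exact hxall b hb
      · rcases List.mem_cons.mp hb with rfl | hb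
        · exact h
        · exact le_trans h (List.rel_of_pairwise_cons hy hb)
  | case4 x xs y ys h ih =>
      rcases List.pairwise_cons.mp hy with ⟨hyall, hy'⟩
      refine List.pairwise_cons.mpr ⟨?_, ih hx hy'⟩
      intro b hb
      have hyx : y ≤ x := le_of_not_ge h
      rcases (mem_mergeTwo _ _ b).mp hb with hb | hb
      · rcases List.mem_cons.mp hb with rfl | hb
        · exact hyx
        · exact le_trans hyx (List.rel_of_pairwise_cons hx hb)
      · exact hyall b hb

-- in a strictly ascending list every element is ≤ the last one
theorem le_getLast_of_pairwise_lt :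
    ∀ (l : List String) (m a : String), l.Pairwise (· < ·) →
      l.getLast? = some m → a ∈ l → a ≤ m := by
  intro l
  induction l with
  | nil => intro m a _ h; simp at h
  | cons x t ih =>
      intro m a hp hl ha
      cases t with
      | nil =>
          simp at hl ha; subst hl; subst ha; rfl
      | cons y t' =>
          rcases List.pairwise_cons.mp hp with ⟨hxall, hp'⟩
          have hl' : (y :: t').getLast? = some m := by
            simpa [List.getLast?_cons_cons] using hl
          rcases List.mem_cons.mp ha with rfl | ha
          · have hy : y ≤ m := ih m y hp' hl' (List.mem_cons_self)
            exact le_of_lt (lt_of_lt_of_le (hxall y List.mem_cons_self) hy)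
          · exact ih m a hp' hl' ha

-- the consecutive-dedup foldl: invariant
theorem dedup_fold_spec :
    ∀ (xs acc : List String), acc.Pairwise (· < ·) → xs.Pairwise (· ≤ ·) →
      (∀ a ∈ acc, ∀ x ∈ xs, a ≤ x) →
      (xs.foldl (fun out x => if out.getLast? ≠ some x then out ++ [x] else out) acc).Pairwise (· < ·) ∧
      (∀ a, a ∈ xs.foldl (fun out x => if out.getLast? ≠ some x then out ++ [x] else out) acc ↔
        a ∈ acc ∨ a ∈ xs) := by
  intro xs
  induction xs with
  | nil =>
      intro acc hacc _ _
      simp only [List.foldl_nil]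
      exact ⟨hacc, by simp⟩
  | cons x t ih =>
      intro acc hacc hxs hle
      rcases List.pairwise_cons.mp hxs with ⟨hxall, ht⟩
      by_cases hx : acc.getLast? = some x
      · -- skipped: x already last of acc
        have hxmem : x ∈ acc := List.mem_of_getLast? hx
        have := ih acc hacc ht (fun a ha y hy => hle a ha y (List.mem_cons_of_mem _ hy))
        refine ⟨by simpa [List.foldl_cons, hx] using this.1, ?_⟩
        intro a
        rw [List.foldl_cons, if_neg (by simp [hx])]
        rw [this.2 a]
        constructor
        · rintro (h | h); · exact Or.inl h
          · exact Or.inr (List.mem_cons_of_mem _ h)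
        · rintro (h | h); · exact Or.inl h
          · rcases List.mem_cons.mp h with rfl | h
            · exact Or.inl hxmem
            · exact Or.inr h
      · -- appended
        have hacc' : (acc ++ [x]).Pairwise (· < ·) := by
          rw [List.pairwise_append]
          refine ⟨hacc, List.pairwise_singleton _ _, ?_⟩
          intro a ha b hb
          rcases List.mem_singleton.mp hb with rfl
          have hax : a ≤ b := hle a ha b List.mem_cons_self
          rcases lt_or_eq_of_le hax with h' | h'
          · exact h'
          · exfalso
            subst h'
            cases hlast : acc.getLast? with
            | none => simp [List.getLast?_eq_none_iff] at hlast; subst hlast; simp at ha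
            | some m =>
                have h1 : a ≤ m := le_getLast_of_pairwise_lt acc m a hacc hlast ha
                have h2 : m ≤ a := hle m (List.mem_of_getLast? hlast) a List.mem_cons_self
                exact hx (by rw [hlast]; congr 1; exact le_antisymm h2 h1)
        have hle' : ∀ a ∈ acc ++ [x], ∀ y ∈ t, a ≤ y := by
          intro a ha y hy
          rcases List.mem_append.mp ha with ha | ha
          · exact hle a ha y (List.mem_cons_of_mem _ hy)
          · rcases List.mem_singleton.mp ha with rfl
            exact hxall y hy
        have := ih (acc ++ [x]) hacc' ht hle'
        refine ⟨by simpa [List.foldl_cons, hx] using this.1, ?_⟩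
        intro a
        rw [List.foldl_cons, if_pos (by simp [hx])]
        rw [this.2 a]
        simp [List.mem_append, List.mem_cons]
        tauto

-- one pairing round: every run stays ascending, the members are unchanged
theorem mergePairs_spec : ∀ (l : List (List String)), (∀ r ∈ l, r.Pairwise (· ≤ ·)) →
    (∀ r ∈ mergePairs l, r.Pairwise (· ≤ ·)) ∧
    (∀ a, (∃ r ∈ mergePairs l, a ∈ r) ↔ ∃ r ∈ l, a ∈ r) := by
  intro l
  induction l using mergePairs.induct with
  | case1 => intro _; simp [mergePairs]
  | case2 r0 =>
      intro hl
      constructor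
      · intro r' hr'
        have hr : r' = r0 := by simpa [mergePairs] using hr'
        subst hr; exact hl r' (by simp)
      · intro a; simp [mergePairs]
  | case3 r1 r2 rest ih =>
      intro hl
      have h1 := hl r1 (by simp)
      have h2 := hl r2 (by simp)
      have := ih (fun r hr => hl r (by simp [hr]))
      constructor
      · intro r hr
        rcases List.mem_cons.mp hr with rfl | hr
        · exact pairwise_mergeTwo r1 r2 h1 h2
        · exact this.1 r hr
      · intro a
        simp only [mergePairs, List.mem_cons]
        constructor
        · rintro ⟨r, hr | hr, ha⟩
          · subst hr
            rcases (mem_mergeTwo r1 r2 a).mp ha with h | h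
            · exact ⟨r1, Or.inl rfl, h⟩
            · exact ⟨r2, Or.inr (Or.inl rfl), h⟩
          · rcases (this.2 a).mp ⟨r, hr, ha⟩ with ⟨r', hr', ha'⟩
            exact ⟨r', Or.inr (Or.inr hr'), ha'⟩
        · rintro ⟨r, hr | hr | hr, ha⟩
          · subst hr
            exact ⟨mergeTwo r r2, Or.inl rfl, (mem_mergeTwo r r2 a).mpr (Or.inl ha)⟩
          · subst hr
            exact ⟨mergeTwo r1 r, Or.inl rfl, (mem_mergeTwo r1 r a).mpr (Or.inr ha)⟩
          · rcases (this.2 a).mpr ⟨r, hr, ha⟩ with ⟨r', hr', ha'⟩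
            exact ⟨r', Or.inr hr', ha'⟩

-- the balanced merge: ascending, with the members of all runs
theorem mergeAll_spec (l : List (List String)) (hl : ∀ r ∈ l, r.Pairwise (· ≤ ·)) :
    (mergeAll l).Pairwise (· ≤ ·) ∧ (∀ a, a ∈ mergeAll l ↔ ∃ r ∈ l, a ∈ r) := by
  fun_induction mergeAll l with
  | case1 => simp
  | case2 r =>
      refine ⟨hl r (by simp), ?_⟩
      intro a; simp
  | case3 r1 r2 rest ih =>
      have hp := mergePairs_spec (r1 :: r2 :: rest) hl
      have := ih hp.1
      exact ⟨this.1, fun a => (this.2 a).trans (hp.2 a)⟩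

-- A's union foldl: nodup, with the members of all sublists
theorem union_fold_spec :
    ∀ (l : List (List String)) (acc : PySem.Set String), acc.Nodup →
      (l.foldl (fun s r => PySem.Set.union s r) acc).Nodup ∧
      (∀ a, a ∈ l.foldl (fun s r => PySem.Set.union s r) acc ↔ a ∈ acc ∨ ∃ s ∈ l, a ∈ s) := by
  intro l
  induction l with
  | nil =>
      intro acc hacc
      simp only [List.foldl_nil]
      exact ⟨hacc, by simp⟩
  | cons s t ih =>
      intro acc hacc
      have := ih (PySem.Set.union acc s) (PySem.Set.nodup_union acc s hacc)
      refine ⟨this.1, ?_⟩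
      intro a
      rw [List.foldl_cons, this.2 a, PySem.Set.mem_union]
      simp
      tauto

-- ===== VERDICT (by name: the statement is the Claim_ definition above) =====
theorem merge_and_sort_lists_spec : Claim_equal_merge_and_sort_lists := by
  intro input_list _
  unfold Spec_merge_and_sort_lists merge_and_sort_lists merge_and_sort_lists_alt
  -- B's side
  have hmerge := mergeAll_spec (input_list.map (fun sublist =>
      PySem.List.sorted (PySem.Set.ofList sublist) (fun x => x) false))
    (by
      intro r hr
      rcases List.mem_map.mp hr with ⟨s, _, rfl⟩
      exact PySem.List.sorted_pairwise (PySem.Set.ofList s) (fun x => x))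
  set merged := mergeAll (input_list.map (fun sublist =>
      PySem.List.sorted (PySem.Set.ofList sublist) (fun x => x) false)) with hmergedDef
  have hded := dedup_fold_spec merged [] List.Pairwise.nil hmerge.1 (by simp)
  set R := merged.foldl (fun out x => if out.getLast? ≠ some x then out ++ [x] else out) [] with hRdef
  -- A's side
  have hunion := union_fold_spec (input_list.map (fun sublist =>
      PySem.List.sorted (PySem.Set.ofList sublist) (fun x => x) false)) PySem.Set.empty
      (by simp [PySem.Set.empty])
  set U := (input_list.map (fun sublist =>
      PySem.List.sorted (PySem.Set.ofList sublist) (fun x => x) false)).foldl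
      (fun s r => PySem.Set.union s r) PySem.Set.empty with hUdef
  -- same members
  have hmemU : ∀ a, a ∈ U ↔ ∃ s ∈ input_list, a ∈ s := by
    intro a
    rw [hunion.2 a]
    simp [PySem.Set.empty, PySem.List.mem_sorted, PySem.Set.mem_ofList]
  have hmemR : ∀ a, a ∈ R ↔ ∃ s ∈ input_list, a ∈ s := by
    intro a
    rw [hded.2 a]
    simp only [List.not_mem_nil, false_or, hmerge.2 a]
    constructor
    · rintro ⟨r, hr, ha⟩
      rcases List.mem_map.mp hr with ⟨s, hs, rfl⟩
      rw [PySem.List.mem_sorted, PySem.Set.mem_ofList] at ha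
      exact ⟨s, hs, ha⟩
    · rintro ⟨s, hs, ha⟩
      exact ⟨_, List.mem_map_of_mem hs,
        (PySem.List.mem_sorted _ _ _ a).mpr ((PySem.Set.mem_ofList s a).mpr ha)⟩
  have hRnodup : R.Nodup := hded.1.imp ne_of_lt
  have hperm : R.Perm U := by
    rw [List.perm_ext_iff_of_nodup hRnodup hunion.1]
    intro a
    rw [hmemR a, hmemU a]
  exact PySem.List.sorted_eq_of_perm_of_pairwise_lt U R (fun x => x) hperm hded.1
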